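-- pv_equiv track=rewrite | github.com/CarlosOrellana99/avance2_python_hermes | database/Logics.py | clasificarcitasCliente
-- ===== SOURCE A (Python) =====
-- def clasificarcitasCliente(listacitas):
--     citaspendientes=[]
--     citasnoconfirmadas=[]
--     citaspasadas=[]
--     if listacitas is not None:
--         for cita in listacitas:
--             if cita['Finalizada']=="False" and cita['Confirmacion']=="True":
--                 citaspendientes.append(cita)
--             elif cita['Confirmacion']=="False":
--                 citasnoconfirmadas.append(cita)
--             elif cita['Finalizada']=="True":
--                 citaspasadas.append(cita)
--     return citaspendientes,citasnoconfirmadas,citaspasadas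
-- ===== SOURCE B (Python) =====
-- def clasificarcitasCliente(listacitas):
--     citas = listacitas or []
--     citaspendientes = [c for c in citas if c['Finalizada'] == "False" and c['Confirmacion'] == "True"]
--     citasnoconfirmadas = [c for c in citas if c['Confirmacion'] == "False"]
--     citaspasadas = [c for c in citas if c['Finalizada'] == "True" and c['Confirmacion'] != "False"]
--     return citaspendientes, citasnoconfirmadas, citaspasadas
-- ===== Notes on version B (the rewrite author's own statement) =====
-- stated objective: simpler
-- what changed: Replaces the single accumulator loop with an if/elif chain by three independent list comprehensions, one per output list, each with an explicit disjoint predicate that encodes the elif precedence.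
-- outside the precondition, e.g. on clasificarcitasCliente([{'Finalizada': 'True'}]): A raises KeyError, B raises KeyError
import Mathlib
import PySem

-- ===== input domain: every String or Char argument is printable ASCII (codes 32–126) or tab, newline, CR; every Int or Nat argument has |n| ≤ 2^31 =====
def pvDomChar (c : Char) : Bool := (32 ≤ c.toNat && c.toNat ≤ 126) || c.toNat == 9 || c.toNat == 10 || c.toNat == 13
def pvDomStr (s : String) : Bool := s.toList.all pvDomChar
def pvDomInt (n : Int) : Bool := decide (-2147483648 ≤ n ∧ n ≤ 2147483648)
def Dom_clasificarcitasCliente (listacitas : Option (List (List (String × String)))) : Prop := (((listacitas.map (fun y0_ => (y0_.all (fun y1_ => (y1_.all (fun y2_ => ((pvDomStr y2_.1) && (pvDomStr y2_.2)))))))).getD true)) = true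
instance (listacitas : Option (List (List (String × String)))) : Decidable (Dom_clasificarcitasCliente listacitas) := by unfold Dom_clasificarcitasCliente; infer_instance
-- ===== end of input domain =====

-- B replaces A's single if/elif classification loop by three independent filters with
-- explicit disjoint predicates; objective: simpler (same O(n) cost).

-- shared helper: Python dict lookup d[k] on an association list; "" stands in for the
-- KeyError case, which Pre_ excludes for both ports.
def pvKey (cita : List (String × String)) (k : String) : String :=
  ((cita.find? (fun p => p.1 == k)).map Prod.snd).getD ""

-- ===== PORT A =====
-- the loop body of A: if/elif/elif chain over the three accumulators
def pvStepA (acc : (List (List (String × String))) × (List (List (String × String))) × (List (List (String × String)))) (cita : List (String × String)) : (List (List (String × String))) × (List (List (String × String))) × (List (List (String × String))) :=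
  if pvKey cita "Finalizada" == "False" && pvKey cita "Confirmacion" == "True" then
    (acc.1 ++ [cita], acc.2.1, acc.2.2)
  else if pvKey cita "Confirmacion" == "False" then
    (acc.1, acc.2.1 ++ [cita], acc.2.2)
  else if pvKey cita "Finalizada" == "True" then
    (acc.1, acc.2.1, acc.2.2 ++ [cita])
  else acc

-- literal transliteration of A: one pass, three accumulators, if/elif/elif chain
def clasificarcitasCliente (listacitas : Option (List (List (String × String)))) : (List (List (String × String))) × (List (List (String × String))) × (List (List (String × String))) :=
  match listacitas with
  | none => ([], [], [])
  | some l => l.foldl pvStepA ([], [], [])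

-- ===== PORT B =====
-- literal transliteration of B: 'listacitas or []', then three list comprehensions
def clasificarcitasCliente_alt (listacitas : Option (List (List (String × String)))) : (List (List (String × String))) × (List (List (String × String))) × (List (List (String × String))) :=
  let citas := match listacitas with | none => [] | some l => l
  ( citas.filter (fun c => pvKey c "Finalizada" == "False" && pvKey c "Confirmacion" == "True")
  , citas.filter (fun c => pvKey c "Confirmacion" == "False")
  , citas.filter (fun c => pvKey c "Finalizada" == "True" && !(pvKey c "Confirmacion" == "False")) )

-- ===== PRECONDITION & SPEC =====
-- Pre_ excludes exactly the inputs on which Python A raises KeyError: some appointment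
-- dict lacking the key 'Finalizada' or 'Confirmacion' (both ports' Pythons raise there).
def Pre_clasificarcitasCliente (listacitas : Option (List (List (String × String)))) : Prop :=
  (listacitas.getD []).all
    (fun c => (c.any (fun p => p.1 == "Finalizada")) && (c.any (fun p => p.1 == "Confirmacion"))) = true
instance (listacitas : Option (List (List (String × String)))) : Decidable (Pre_clasificarcitasCliente listacitas) := by unfold Pre_clasificarcitasCliente; infer_instance
def pvWitness_clasificarcitasCliente : (Option (List (List (String × String)))) :=
  some [[("Finalizada", "False"), ("Confirmacion", "True")], [("Finalizada", "True"), ("Confirmacion", "True")]]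

def Spec_clasificarcitasCliente (listacitas : Option (List (List (String × String)))) (out : (List (List (String × String))) × (List (List (String × String))) × (List (List (String × String)))) : Prop := out = clasificarcitasCliente_alt listacitas
instance (listacitas : Option (List (List (String × String)))) (out : (List (List (String × String))) × (List (List (String × String))) × (List (List (String × String)))) : Decidable (Spec_clasificarcitasCliente listacitas out) := by unfold Spec_clasificarcitasCliente; infer_instance

-- ===== CLAIM (what is proved, stated in full; the proofs are below) =====
def Claim_equal_clasificarcitasCliente : Prop := ∀ (listacitas : Option (List (List (String × String)))), Dom_clasificarcitasCliente listacitas → Pre_clasificarcitasCliente listacitas → Spec_clasificarcitasCliente listacitas (clasificarcitasCliente listacitas)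

-- ===== LEMMAS AND PROOFS =====

-- the three filter predicates, named for brevity
def pvPend (c : List (String × String)) : Bool :=
  pvKey c "Finalizada" == "False" && pvKey c "Confirmacion" == "True"
def pvNoconf (c : List (String × String)) : Bool :=
  pvKey c "Confirmacion" == "False"
def pvPas (c : List (String × String)) : Bool :=
  pvKey c "Finalizada" == "True" && !(pvKey c "Confirmacion" == "False")

-- loop invariant: A's fold starting from any accumulators appends exactly the filters
theorem foldl_eq_filters (l : List (List (String × String)))
    (p n q : List (List (String × String))) :
    l.foldl pvStepA (p, n, q)
    = (p ++ l.filter pvPend, n ++ l.filter pvNoconf, q ++ l.filter pvPas) := by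
  induction l generalizing p n q with
  | nil => simp
  | cons c rest ih =>
    simp only [List.foldl_cons, List.filter_cons]
    by_cases h1 : (pvKey c "Finalizada" == "False" && pvKey c "Confirmacion" == "True") = true
    · have hc : pvKey c "Confirmacion" = "True" := by
        simpa using (Bool.and_elim_right h1)
      have hf : pvKey c "Finalizada" = "False" := by
        simpa using (Bool.and_elim_left h1)
      have h2 : pvNoconf c = false := by simp [pvNoconf, hc]
      have h3 : pvPas c = false := by simp [pvPas, hf]
      rw [show pvStepA (p, n, q) c = (p ++ [c], n, q) from by simp [pvStepA, h1], ih]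
      simp [pvPend, h1, h2, h3]
    · by_cases h2 : (pvKey c "Confirmacion" == "False") = true
      · have h3 : pvPas c = false := by simp [pvPas] at h2 ⊢; simp [h2]
        rw [show pvStepA (p, n, q) c = (p, n ++ [c], q) from by simp [pvStepA, h1, h2], ih]
        simp [pvPend, h1, pvNoconf, h2, h3]
      · by_cases h3 : (pvKey c "Finalizada" == "True") = true
        · rw [show pvStepA (p, n, q) c = (p, n, q ++ [c]) from by simp [pvStepA, h1, h2, h3], ih]
          simp [pvPend, h1, pvNoconf, h2, pvPas, h3]
        · rw [show pvStepA (p, n, q) c = (p, n, q) from by simp [pvStepA, h1, h2, h3], ih]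
          simp [pvPend, h1, pvNoconf, h2, pvPas, h3]

-- ===== VERDICT (by name: the statement is the Claim_ definition above) =====
theorem clasificarcitasCliente_spec : Claim_equal_clasificarcitasCliente := by
  intro listacitas _ _
  unfold Spec_clasificarcitasCliente clasificarcitasCliente clasificarcitasCliente_alt
  cases listacitas with
  | none => rfl
  | some l => simpa [pvPend, pvNoconf, pvPas] using foldl_eq_filters l [] [] []
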